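-- pv_equiv track=rewrite | github.com/0general/coding-test | programmers/LV4/무지의 먹방 라이브.py | solution
-- ===== SOURCE A (Python) =====
-- def solution(food_times, k):
--
--     # k보다 작거나 같은 수 중에서 마지막 인덱스를 가리키는 최대 초 수를 이분탐색으로 구하라.
--
--     l, r = 0, 100000000  # r = (2*10^13) / 200,000
--     n = len(food_times)
--     minor, check = 0, 0  # 모든 행에 빼야할 수, 마지막 인덱스를 가리킬 때의 초
--     while l <= r:
--         mid = (l+r)//2
--         last = n*mid  # mid번 돌았을 때 마지막 인덱스를 가리킬 때의 초
--         for i in food_times: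
--             tmp = i - mid
--             if tmp < 0:
--                 last += tmp
--         if last > k:
--             r = mid - 1
--         else:
--             l = mid + 1
--             minor, check = mid, last
--     food_times = [f-minor for f in food_times]  # 갱신
--
--     for i in range(n):
--         if food_times[i] > 0 and check == k:
--             return i + 1
--         elif food_times[i] > 0:
--             check += 1
--
--     return -1
-- ===== SOURCE B (Python) =====
-- def solution(food_times, k):
--     # Sort + prefix sums: evaluate "seconds consumed after m full levels", i.e.
--     # sum(min(f, m)), in O(log n) via a hand-rolled bisect instead of A's O(n)
--     # rescan, and find the largest feasible m in [0, 10^8] by binary lifting.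
--     CAP = 100000000
--     n = len(food_times)
--     srt = sorted(food_times)
--     pre = [0]
--     for v in srt:
--         pre.append(pre[-1] + v)
--
--     def eaten(m):
--         # sum(min(f, m) for f in food_times) = pre[j] + (n - j) * m,
--         # where j = number of sorted values <= m (bisect_right).
--         lo, hi = 0, n
--         while lo < hi:
--             mid = (lo + hi) // 2
--             if srt[mid] <= m:
--                 lo = mid + 1
--             else:
--                 hi = mid
--         return pre[lo] + (n - lo) * m
--
--     if eaten(0) > k:
--         minor, check = 0, 0
--     else:
--         m = 0
--         b = 1 << 26
--         while b:
--             if m + b <= CAP and eaten(m + b) <= k: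
--                 m += b
--             b >>= 1
--         minor, check = m, eaten(m)
--
--     for i, f in enumerate(food_times):
--         if f - minor > 0:
--             if check == k:
--                 return i + 1
--             check += 1
--     return -1
-- ===== Notes on version B (the rewrite author's own statement) =====
-- stated objective: faster
-- what changed: B sorts food_times once and builds prefix sums, evaluates 'seconds consumed after m rounds' (sum of min(f,m)) in O(log n) via a hand-rolled bisect instead of A's O(n) rescan per probe, and finds the largest feasible m <= 10^8 by binary lifting over powers of two instead of A's l/r midpoint search.
import Mathlib
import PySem

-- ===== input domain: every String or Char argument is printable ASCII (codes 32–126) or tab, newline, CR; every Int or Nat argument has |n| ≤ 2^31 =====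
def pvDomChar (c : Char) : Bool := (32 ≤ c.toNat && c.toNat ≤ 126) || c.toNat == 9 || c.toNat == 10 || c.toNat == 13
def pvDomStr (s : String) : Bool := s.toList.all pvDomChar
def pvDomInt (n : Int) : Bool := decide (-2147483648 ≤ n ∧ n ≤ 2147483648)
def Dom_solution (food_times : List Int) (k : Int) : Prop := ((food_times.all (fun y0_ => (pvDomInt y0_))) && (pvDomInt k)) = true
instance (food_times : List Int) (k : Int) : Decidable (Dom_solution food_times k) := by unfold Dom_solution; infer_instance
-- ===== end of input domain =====

-- B replaces A's binary search with O(n) rescans by sort + prefix sums, an O(log n)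
-- bisect evaluation of "seconds consumed", and binary lifting for the answer.

-- ===== PORT A =====

-- `last = n*mid; for i in food_times: tmp = i - mid; if tmp < 0: last += tmp`
def solLast (food : List Int) (n mid : Int) : Int :=
  food.foldl (fun last i => if i - mid < 0 then last + (i - mid) else last) (n * mid)

-- `while l <= r:` binary-search loop, carrying (minor, check)
def solLoop (food : List Int) (k n : Int) (l r minor check : Int) : Int × Int :=
  if _h : l ≤ r then
    let mid := PySem.Int.floordiv (l + r) 2
    let last := solLast food n mid
    if last > k then solLoop food k n l (mid - 1) minor check
    else solLoop food k n (mid + 1) r mid last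
  else (minor, check)
termination_by (r + 1 - l).toNat
decreasing_by
  · have := PySem.Int.floordiv_two_mid_bounds _h
    omega
  · have := PySem.Int.floordiv_two_mid_bounds _h
    omega

-- `for i in range(n): if food_times[i] > 0 and check == k: return i+1 elif ...`
def solScan (food2 : List Int) (k : Int) : List Int → Int → Int
  | [], _ => -1
  | i :: rest, check =>
    if PySem.List.pyGetD food2 i 0 > 0 ∧ check = k then i + 1
    else if PySem.List.pyGetD food2 i 0 > 0 then solScan food2 k rest (check + 1)
    else solScan food2 k rest check

def solution (food_times : List Int) (k : Int) : Int :=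
  let n : Int := food_times.length
  let mc := solLoop food_times k n 0 100000000 0 0
  let food2 := food_times.map (fun f => f - mc.1)
  solScan food2 k (PySem.List.pyRange 0 n 1) mc.2

-- ===== PORT B =====

-- hand-rolled bisect_right: `while lo < hi: ...`
def altBisect (srt : List Int) (m lo hi : Int) : Int :=
  if _h : lo < hi then
    let mid := PySem.Int.floordiv (lo + hi) 2
    if PySem.List.pyGetD srt mid 0 ≤ m then altBisect srt m (mid + 1) hi
    else altBisect srt m lo mid
  else lo
termination_by (hi - lo).toNat
decreasing_by
  · have := PySem.Int.floordiv_two_mid_bounds (le_of_lt _h)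
    omega
  · have h2 : PySem.Int.floordiv (lo + hi) 2 < hi :=
      (PySem.Int.floordiv_lt_iff_lt_mul (by omega)).mpr (by omega)
    omega

-- `def eaten(m): ... return pre[lo] + (n - lo) * m`
def altEaten (srt pre : List Int) (n m : Int) : Int :=
  let j := altBisect srt m 0 n
  PySem.List.pyGetD pre j 0 + (n - j) * m

-- `while b: if m + b <= CAP and eaten(m + b) <= k: m += b; b //= 2`
def altLift (srt pre : List Int) (n k m b : Int) : Int :=
  if _h : 0 < b then
    let m' := if m + b ≤ 100000000 ∧ altEaten srt pre n (m + b) ≤ k then m + b else m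
    altLift srt pre n k m' (PySem.Int.floordiv b 2)
  else m
termination_by b.toNat
decreasing_by
  have h2 : PySem.Int.floordiv b 2 = b / 2 := PySem.Int.floordiv_eq_ediv_of_pos (by omega)
  omega

-- `for i, f in enumerate(food_times): ...`
def altScan (k minor : Int) : List (Int × Int) → Int → Int
  | [], _ => -1
  | (i, f) :: rest, check =>
    if f - minor > 0 then
      (if check = k then i + 1 else altScan k minor rest (check + 1))
    else altScan k minor rest check

def altFind (food : List Int) (k : Int) : Int × Int :=
  let n : Int := food.length
  let srt := PySem.List.sorted food (fun x => x) false
  let pre := srt.foldl (fun p v => p ++ [PySem.List.pyGetD p (-1) 0 + v]) [0]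
  if altEaten srt pre n 0 > k then (0, 0)
  else
    let m := altLift srt pre n k 0 (2 ^ 26)
    (m, altEaten srt pre n m)

def solution_alt (food_times : List Int) (k : Int) : Int :=
  let mc := altFind food_times k
  altScan k mc.1 (PySem.List.enumerate food_times 0) mc.2

-- ===== PRECONDITION & SPEC =====
def Spec_solution (food_times : List Int) (k : Int) (out : Int) : Prop := out = solution_alt food_times k
instance (food_times : List Int) (k : Int) (out : Int) : Decidable (Spec_solution food_times k out) := by unfold Spec_solution; infer_instance

-- ===== CLAIM (what is proved, stated in full; the proofs are below) =====
def Claim_equal_solution : Prop := ∀ (food_times : List Int) (k : Int), Dom_solution food_times k → Spec_solution food_times k (solution food_times k)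

-- ===== LEMMAS AND PROOFS =====

-- total seconds consumed when every plate is reduced by m rounds: sum(min(f, m))
def eatS (food : List Int) (m : Int) : Int := (food.map (fun f => min f m)).sum

-- the unique value both searches compute: (0,0) when even 0 rounds overshoot k,
-- else the largest m in [0, 10^8] with eatS food m ≤ k, paired with eatS food m
def GoodMC (food : List Int) (k : Int) (p : Int × Int) : Prop :=
  (p = (0, 0) ∧ k < eatS food 0) ∨
  (0 ≤ p.1 ∧ p.1 ≤ 100000000 ∧ eatS food p.1 ≤ k ∧ p.2 = eatS food p.1 ∧
    (p.1 < 100000000 → k < eatS food (p.1 + 1)))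

theorem eatS_mono (food : List Int) {m m' : Int} (h : m ≤ m') :
    eatS food m ≤ eatS food m' := by
  unfold eatS
  apply List.sum_le_sum
  intro f _
  exact min_le_min_left f h

theorem good_fst_le (food : List Int) (k : Int) {p q : Int × Int}
    (hp : GoodMC food k p) (hq : GoodMC food k q) : p.1 ≤ q.1 := by
  rcases hp with ⟨hp0, hpk⟩ | ⟨hp0, hpc, hpk, hpv, hpm⟩
  · rcases hq with ⟨hq0, _⟩ | ⟨hq0, _, _, _, _⟩
    · simp [hp0, hq0]
    · simp [hp0]; omega
  · rcases hq with ⟨hq0, hqk⟩ | ⟨hq0, hqc, hqk, hqv, hqm⟩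
    · exact absurd (le_trans (eatS_mono food hp0) hpk) (by omega)
    · by_contra hlt
      have h1 : q.1 + 1 ≤ p.1 := by omega
      have h2 : k < eatS food (q.1 + 1) := hqm (by omega)
      exact absurd (le_trans (eatS_mono food h1) hpk) (by omega)

theorem goodMC_unique (food : List Int) (k : Int) {p q : Int × Int}
    (hp : GoodMC food k p) (hq : GoodMC food k q) : p = q := by
  have h1 := good_fst_le food k hp hq
  have h2 := good_fst_le food k hq hp
  have hfst : p.1 = q.1 := le_antisymm h1 h2
  rcases hp with ⟨hp0, hpk⟩ | ⟨hpc0, hpc, hpk, hpv, hpm⟩ <;>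
    rcases hq with ⟨hq0, hqk⟩ | ⟨hqc0, hqc, hqk, hqv, hqm⟩
  · rw [hp0, hq0]
  · rw [hp0] at hfst; exact absurd (le_trans (eatS_mono food (by omega)) hqk) (by omega)
  · rw [hq0] at hfst; exact absurd (le_trans (eatS_mono food (by omega)) hpk) (by omega)
  · exact Prod.ext hfst (by rw [hpv, hqv, hfst])

theorem solLast_fold (food : List Int) (m c : Int) :
    food.foldl (fun last i => if i - m < 0 then last + (i - m) else last) c
      = c + (food.map (fun i => min (i - m) 0)).sum := by
  induction food generalizing c with
  | nil => simp
  | cons f t ih =>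
    simp only [List.foldl_cons, List.map_cons, List.sum_cons, ih]
    split_ifs <;> [skip; rw [min_eq_right (by omega)]] <;> [rw [min_eq_left (by omega)]; skip] <;> ring

theorem eatS_split (food : List Int) (m : Int) :
    eatS food m = (food.length : Int) * m + (food.map (fun i => min (i - m) 0)).sum := by
  induction food with
  | nil => simp [eatS]
  | cons f t ih =>
    simp only [eatS, List.map_cons, List.sum_cons, List.length_cons] at *
    rw [ih]
    have : min f m = m + min (f - m) 0 := by omega
    push_cast
    rw [this]; ring

theorem solLast_eq (food : List Int) (m : Int) :
    solLast food (food.length : Int) m = eatS food m := by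
  rw [solLast, solLast_fold, eatS_split]

theorem exit_good (food : List Int) (k l r minor check : Int)
    (hl : 0 ≤ l) (hlr' : l = r + 1) (hr : r ≤ 100000000)
    (hmc : (l = 0 ∧ minor = 0 ∧ check = 0) ∨
      (1 ≤ l ∧ minor = l - 1 ∧ eatS food (l - 1) ≤ k ∧ check = eatS food (l - 1)))
    (hrc : r < 100000000 → k < eatS food (r + 1)) :
    GoodMC food k (minor, check) := by
  rcases hmc with ⟨h0, hm, hc⟩ | ⟨h1, hm, hk, hc⟩
  · subst hm hc
    have h2 := hrc (by omega)
    have h3 := eatS_mono food (show r + 1 ≤ (0:Int) by omega)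
    exact Or.inl ⟨rfl, by omega⟩
  · subst hm
    refine Or.inr ⟨by omega, by omega, hk, hc, ?_⟩
    intro hcap
    have he : l - 1 + 1 = r + 1 := by omega
    rw [he]
    exact hrc (by omega)

theorem solLoop_good_aux (food : List Int) (k : Int) (fuel : Nat) :
    ∀ (l r minor check : Int), (r + 1 - l).toNat ≤ fuel →
    0 ≤ l → l ≤ r + 1 → r ≤ 100000000 →
    ((l = 0 ∧ minor = 0 ∧ check = 0) ∨
      (1 ≤ l ∧ minor = l - 1 ∧ eatS food (l - 1) ≤ k ∧ check = eatS food (l - 1))) →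
    (r < 100000000 → k < eatS food (r + 1)) →
    GoodMC food k (solLoop food k (food.length : Int) l r minor check) := by
  induction fuel with
  | zero =>
    intro l r minor check hfl hl hlr hr hmc hrc
    have hgt : ¬ l ≤ r := by omega
    rw [solLoop, dif_neg hgt]
    exact exit_good food k l r minor check hl (by omega) hr hmc hrc
  | succ f ih =>
    intro l r minor check hfl hl hlr hr hmc hrc
    rw [solLoop]
    by_cases hc : l ≤ r
    · rw [dif_pos hc]
      simp only [solLast_eq]
      have hmb := PySem.Int.floordiv_two_mid_bounds hc
      set mid := PySem.Int.floordiv (l + r) 2 with hmiddef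
      by_cases hbig : eatS food mid > k
      · rw [if_pos hbig]
        exact ih l (mid - 1) minor check (by omega) hl (by omega) (by omega) hmc
          (by intro _; have : mid - 1 + 1 = mid := by omega
              rw [this]; omega)
      · rw [if_neg hbig]
        refine ih (mid + 1) r mid (eatS food mid) (by omega) (by omega) (by omega) hr
          (Or.inr ⟨by omega, by omega, ?_, ?_⟩) hrc
        · have : mid + 1 - 1 = mid := by omega
          rw [this]; omega
        · have : mid + 1 - 1 = mid := by omega
          rw [this]
    · rw [dif_neg hc]
      exact exit_good food k l r minor check hl (by omega) hr hmc hrc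

theorem solLoop_good (food : List Int) (k : Int) (l r minor check : Int)
    (hl : 0 ≤ l) (hlr : l ≤ r + 1) (hr : r ≤ 100000000)
    (hmc : (l = 0 ∧ minor = 0 ∧ check = 0) ∨
      (1 ≤ l ∧ minor = l - 1 ∧ eatS food (l - 1) ≤ k ∧ check = eatS food (l - 1)))
    (hrc : r < 100000000 → k < eatS food (r + 1)) :
    GoodMC food k (solLoop food k (food.length : Int) l r minor check) :=
  solLoop_good_aux food k (r + 1 - l).toNat l r minor check le_rfl hl hlr hr hmc hrc

theorem eatS_perm {xs ys : List Int} (h : xs.Perm ys) (m : Int) :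
    eatS xs m = eatS ys m :=
  List.Perm.sum_eq (h.map _)

theorem preFold (xs : List Int) :
    xs.foldl (fun p v => p ++ [PySem.List.pyGetD p (-1) 0 + v]) [0]
      = (List.range (xs.length + 1)).map (fun j => ((xs.take j).sum : Int)) := by
  induction xs using List.reverseRecOn with
  | nil => simp
  | append_singleton xs v ih =>
    rw [List.foldl_append, ih]
    simp only [List.foldl_cons, List.foldl_nil]
    have hone : PySem.List.pyGetD
        ((List.range (xs.length + 1)).map (fun j => ((xs.take j).sum : Int))) (-1) 0
        = xs.sum := by
      rw [List.range_succ, List.map_append, List.map_cons, List.map_nil,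
        PySem.List.pyGetD_neg_one_append_singleton]
      rw [List.take_length]
    rw [hone]
    have hlen : (xs ++ [v]).length = xs.length + 1 := by simp
    conv_rhs => rw [hlen, List.range_succ, List.map_append, List.map_cons, List.map_nil]
    congr 1
    · apply List.map_congr_left
      intro j hj
      rw [List.mem_range] at hj
      rw [List.take_append_of_le_length (by omega)]
    · congr 1
      rw [List.take_of_length_le (by simp), List.sum_append]
      simp

theorem getD_mono (srt : List Int) (hpair : srt.Pairwise (· ≤ ·)) (i j : Nat)
    (hij : i ≤ j) (hj : j < srt.length) : srt.getD i 0 ≤ srt.getD j 0 := by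
  rcases Nat.lt_or_ge i j with hlt | hge
  · rw [List.getD_eq_getElem srt 0 (by omega), List.getD_eq_getElem srt 0 hj]
    exact List.pairwise_iff_getElem.mp hpair i j (by omega) hj hlt
  · have : i = j := by omega
    rw [this]

theorem altBisect_spec_aux (srt : List Int) (m : Int)
    (hpair : srt.Pairwise (· ≤ ·)) (fuel : Nat) :
    ∀ lo hi : Int, (hi - lo).toNat ≤ fuel → 0 ≤ lo → lo ≤ hi → hi ≤ (srt.length : Int) →
    (∀ i : Nat, (i : Int) < lo → srt.getD i 0 ≤ m) →
    (∀ i : Nat, hi ≤ (i : Int) → i < srt.length → m < srt.getD i 0) →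
    (0 ≤ altBisect srt m lo hi ∧ altBisect srt m lo hi ≤ (srt.length : Int) ∧
     (∀ i : Nat, (i : Int) < altBisect srt m lo hi → srt.getD i 0 ≤ m) ∧
     (∀ i : Nat, altBisect srt m lo hi ≤ (i : Int) → i < srt.length → m < srt.getD i 0)) := by
  induction fuel with
  | zero =>
    intro lo hi hf h0 hlh hhl Hlow Hhigh
    have hc : ¬ lo < hi := by omega
    rw [altBisect, dif_neg hc]
    exact ⟨h0, by omega, Hlow, fun i hi1 hi2 => Hhigh i (by omega) hi2⟩
  | succ f ih =>
    intro lo hi hf h0 hlh hhl Hlow Hhigh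
    rw [altBisect]
    by_cases hc : lo < hi
    · rw [dif_pos hc]
      have hmb := PySem.Int.floordiv_two_mid_bounds (le_of_lt hc)
      set mid := PySem.Int.floordiv (lo + hi) 2 with hmiddef
      have hmidlt : mid < hi := by
        rw [hmiddef]
        exact (PySem.Int.floordiv_lt_iff_lt_mul (by omega)).mpr (by omega)
      have hget : PySem.List.pyGetD srt mid 0 = srt.getD mid.toNat 0 := by
        rw [PySem.List.pyGetD_eq_getElem srt 0 (by omega) (by omega),
          List.getD_eq_getElem srt 0 (by omega)]
      by_cases hle : PySem.List.pyGetD srt mid 0 ≤ m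
      · rw [if_pos hle]
        rw [hget] at hle
        refine ih (mid + 1) hi (by omega) (by omega) (by omega) hhl ?_ Hhigh
        intro i hi1
        exact le_trans (getD_mono srt hpair i mid.toNat (by omega) (by omega)) hle
      · rw [if_neg hle]
        rw [hget] at hle
        push Not at hle
        refine ih lo mid (by omega) h0 (by omega) (by omega) Hlow ?_
        intro i hi1 hi2
        exact lt_of_lt_of_le hle (getD_mono srt hpair mid.toNat i (by omega) hi2)
    · rw [dif_neg hc]
      exact ⟨h0, by omega, Hlow, fun i hi1 hi2 => Hhigh i (by omega) hi2⟩

theorem eatS_split_sorted (srt : List Int) (m : Int) (t : Nat) (ht : t ≤ srt.length)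
    (Hlow : ∀ i : Nat, i < t → srt.getD i 0 ≤ m)
    (Hhigh : ∀ i : Nat, t ≤ i → i < srt.length → m < srt.getD i 0) :
    eatS srt m = (srt.take t).sum + ((srt.length : Int) - t) * m := by
  unfold eatS
  conv_lhs => rw [← List.take_append_drop t srt]
  rw [List.map_append, List.sum_append]
  have h1 : (srt.take t).map (fun f => min f m) = srt.take t := by
    apply List.ext_getElem (by simp)
    intro i hi1 hi2
    have hit : i < t := by simp at hi2; omega
    have hilen : i < srt.length := by omega
    have hle := Hlow i hit
    rw [List.getD_eq_getElem srt 0 hilen] at hle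
    simp [List.getElem_take, min_eq_left hle]
  have h2 : (srt.drop t).map (fun f => min f m) = List.replicate (srt.length - t) m := by
    apply List.ext_getElem (by simp)
    intro i hi1 hi2
    have hilen : t + i < srt.length := by simp at hi1; omega
    have hgt := Hhigh (t + i) (by omega) hilen
    rw [List.getD_eq_getElem srt 0 hilen] at hgt
    simp [List.getElem_drop, List.getElem_replicate, min_eq_right (le_of_lt hgt)]
  rw [h1, h2, List.sum_replicate, nsmul_eq_mul]
  have : ((srt.length - t : Nat) : Int) = (srt.length : Int) - t := by omega
  rw [this]

theorem altEaten_eq (srt : List Int) (hpair : srt.Pairwise (· ≤ ·)) (m : Int) :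
    altEaten srt (srt.foldl (fun p v => p ++ [PySem.List.pyGetD p (-1) 0 + v]) [0])
      (srt.length : Int) m = eatS srt m := by
  obtain ⟨hb0, hb1, hlow, hhigh⟩ := altBisect_spec_aux srt m hpair
    ((srt.length : Int) - 0).toNat 0 (srt.length : Int) le_rfl le_rfl (by omega) le_rfl
    (by intro i h; omega) (by intro i h1 h2; omega)
  show (let j := altBisect srt m 0 (srt.length : Int);
    PySem.List.pyGetD (srt.foldl (fun p v => p ++ [PySem.List.pyGetD p (-1) 0 + v]) [0]) j 0
      + ((srt.length : Int) - j) * m) = eatS srt m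
  set j := altBisect srt m 0 (srt.length : Int) with hjdef
  simp only []
  rw [preFold]
  have hjn : j.toNat ≤ srt.length := by omega
  have hpre : PySem.List.pyGetD
      ((List.range (srt.length + 1)).map (fun j => ((srt.take j).sum : Int))) j 0
      = (srt.take j.toNat).sum := by
    rw [PySem.List.pyGetD_eq_getElem _ 0 hb0 (by simp; omega)]
    rw [List.getElem_map, List.getElem_range]
  rw [hpre]
  rw [eatS_split_sorted srt m j.toNat hjn
    (fun i hi => hlow i (by omega)) (fun i hi1 hi2 => hhigh i (by omega) hi2)]
  have : ((j.toNat : Nat) : Int) = j := by omega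
  rw [this]

theorem altLift_good (srt pre : List Int) (n k : Int)
    (hE : ∀ m : Int, altEaten srt pre n m = eatS srt m) (e : Nat) :
    ∀ m : Int, 0 ≤ m → m ≤ 100000000 → eatS srt m ≤ k →
    (∀ m', eatS srt m' ≤ k → m' ≤ 100000000 → m' < m + 2 * 2 ^ e) →
    (0 ≤ altLift srt pre n k m (2 ^ e) ∧ altLift srt pre n k m (2 ^ e) ≤ 100000000 ∧
     eatS srt (altLift srt pre n k m (2 ^ e)) ≤ k ∧
     (∀ m', eatS srt m' ≤ k → m' ≤ 100000000 → m' ≤ altLift srt pre n k m (2 ^ e))) := by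
  have hstep : ∀ (m b : Int), 0 < b → altLift srt pre n k m b
      = altLift srt pre n k
          (if m + b ≤ 100000000 ∧ eatS srt (m + b) ≤ k then m + b else m)
          (PySem.Int.floordiv b 2) := by
    intro m b hb
    rw [altLift, dif_pos hb]
    simp only [hE]
  have hzero : ∀ m : Int, altLift srt pre n k m 0 = m := by
    intro m
    rw [altLift, dif_neg (by norm_num)]
  induction e with
  | zero =>
    intro m h0 hcap hfeas hbound
    rw [hstep m (2 ^ 0) (by norm_num), show PySem.Int.floordiv ((2:Int) ^ 0) 2 = 0 by decide,
      pow_zero] at *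
    by_cases hc : m + 1 ≤ 100000000 ∧ eatS srt (m + 1) ≤ k
    · rw [if_pos hc, hzero]
      refine ⟨by omega, hc.1, hc.2, ?_⟩
      intro m' h1 h2
      have := hbound m' h1 h2
      omega
    · rw [if_neg hc, hzero]
      refine ⟨h0, hcap, hfeas, ?_⟩
      intro m' h1 h2
      have h3 := hbound m' h1 h2
      by_contra hgt
      push Not at hgt
      have heq : m' = m + 1 := by omega
      rw [heq] at h1 h2
      exact hc ⟨h2, h1⟩
  | succ e ihe =>
    intro m h0 hcap hfeas hbound
    have hp : ((2:Int) ^ (e + 1)) = 2 * 2 ^ e := by ring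
    have hppos : (0:Int) < 2 ^ (e + 1) := by positivity
    have hfd : PySem.Int.floordiv ((2:Int) ^ (e + 1)) 2 = 2 ^ e := by
      rw [PySem.Int.floordiv_eq_ediv_of_pos (by norm_num), hp]
      exact Int.mul_ediv_cancel_left _ (by norm_num)
    rw [hstep m (2 ^ (e + 1)) hppos, hfd]
    by_cases hc : m + 2 ^ (e + 1) ≤ 100000000 ∧ eatS srt (m + 2 ^ (e + 1)) ≤ k
    · rw [if_pos hc]
      refine ihe (m + 2 ^ (e + 1)) (by positivity) hc.1 hc.2 ?_
      intro m' h1 h2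
      have h3 := hbound m' h1 h2
      have h4 : (0:Int) < 2 ^ e := by positivity
      linarith [hp]
    · rw [if_neg hc]
      refine ihe m h0 hcap hfeas ?_
      intro m' h1 h2
      by_contra h4
      push Not at h4
      have h5 : m + 2 ^ (e + 1) ≤ m' := by linarith [hp]
      exact hc ⟨by omega, le_trans (eatS_mono srt h5) h1⟩

theorem altFind_good (food : List Int) (k : Int) :
    GoodMC food k (altFind food k) := by
  have hperm : (PySem.List.sorted food (fun x => x) false).Perm food :=
    PySem.List.sorted_perm food (fun x => x) false
  have hpair : (PySem.List.sorted food (fun x => x) false).Pairwise (· ≤ ·) := by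
    simpa using PySem.List.sorted_pairwise food (fun x => x)
  have hlen : (PySem.List.sorted food (fun x => x) false).length = food.length :=
    hperm.length_eq
  simp only [altFind]
  set srt := PySem.List.sorted food (fun x => x) false with hsrt
  set pre := srt.foldl (fun p v => p ++ [PySem.List.pyGetD p (-1) 0 + v]) [0] with hpre
  have hE : ∀ m : Int, altEaten srt pre (food.length : Int) m = eatS srt m := by
    intro m
    rw [hpre, ← hlen]
    exact altEaten_eq srt hpair m
  by_cases hc : altEaten srt pre (food.length : Int) 0 > k
  · rw [if_pos hc]
    rw [hE] at hc
    exact Or.inl ⟨rfl, by rw [← eatS_perm hperm 0]; omega⟩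
  · rw [if_neg hc]
    rw [hE] at hc
    obtain ⟨g0, g1, g2, g3⟩ := altLift_good srt pre (food.length : Int) k hE 26 0
      (by omega) (by norm_num) (by omega)
      (by intro m' _ h2; norm_num; omega)
    refine Or.inr ⟨g0, g1, ?_, ?_, ?_⟩
    · rw [← eatS_perm hperm]; exact g2
    · rw [hE, eatS_perm hperm]
    · intro hcap
      by_contra h4
      push Not at h4
      rw [← eatS_perm hperm] at h4
      have := g3 _ h4 (by omega)
      omega

theorem scan_eq (food : List Int) (minor k : Int) :
    ∀ (tl : List Int) (i0 check : Int), 0 ≤ i0 → tl = food.drop i0.toNat →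
    solScan (food.map (fun f => f - minor)) k
        (PySem.List.pyRange i0 (food.length : Int) 1) check
      = altScan k minor (PySem.List.enumerate tl i0) check := by
  intro tl
  induction tl with
  | nil =>
    intro i0 check h0 hdrop
    have hlen : (food.length : Int) ≤ i0 := by
      have := congrArg List.length hdrop
      simp [List.length_drop] at this
      omega
    rw [PySem.List.pyRange_one_eq_nil hlen]
    simp [solScan, altScan, PySem.List.enumerate]
  | cons f rest ih =>
    intro i0 check h0 hdrop
    have hlt : i0.toNat < food.length := by
      by_contra hge
      rw [List.drop_eq_nil_of_le (by omega)] at hdrop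
      simp at hdrop
    have hi0 : i0 < (food.length : Int) := by omega
    rw [PySem.List.pyRange_one_cons hi0, PySem.List.enumerate_cons]
    have hf : food[i0.toNat] = f := by
      have h9 : food[i0.toNat]? = some f := by
        rw [← List.head?_drop, ← hdrop]; rfl
      rw [List.getElem?_eq_getElem hlt] at h9
      exact Option.some.inj h9
    have hget : PySem.List.pyGetD (food.map (fun f => f - minor)) i0 0 = f - minor := by
      rw [PySem.List.pyGetD_eq_getElem _ 0 h0 (by simpa using hi0)]
      simp [hf]
    have hrest : rest = food.drop (i0 + 1).toNat := by
      have h10 : (i0 + 1).toNat = i0.toNat + 1 := by omega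
      have := congrArg List.tail hdrop
      simpa [List.tail_drop, h10] using this
    simp only [solScan, altScan, hget, gt_iff_lt, sub_pos]
    by_cases hpos : minor < f <;> by_cases hck : check = k <;>
      simp only [hpos, hck, and_true, and_false, if_true, if_false, and_self]
    · exact ih (i0 + 1) (check + 1) (by omega) hrest
    · exact ih (i0 + 1) k (by omega) hrest
    · exact ih (i0 + 1) check (by omega) hrest

-- ===== VERDICT (by name: the statement is the Claim_ definition above) =====
theorem solution_spec : Claim_equal_solution := by
  intro food k _
  have hA := solLoop_good food k 0 100000000 0 0 (by omega) (by omega) (by omega)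
    (Or.inl ⟨rfl, rfl, rfl⟩) (by omega)
  have hB := altFind_good food k
  have hEq := goodMC_unique food k hA hB
  simp only [Spec_solution, solution, solution_alt, hEq]
  exact scan_eq food (altFind food k).1 k food 0 (altFind food k).2 (by omega) (by simp)
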